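-- pv_equiv track=rewrite | github.com/morduun/ose-sheet | backend/app/services/modifiers.py | _xp_bonus_for_class
-- ===== SOURCE A (Python) =====
-- _XP_BONUS_PCT = {3: -20, 4: -20, 5: -20,
--                  6: -10, 7: -10, 8: -10,
--                  9: 0, 10: 0, 11: 0, 12: 0,
--                  13: 5, 14: 5, 15: 5,
--                  16: 10, 17: 10, 18: 10}
--
-- def _clamp(score: int) -> int:
--     """Clamp score to valid 3–18 range."""
--     return max(3, min(18, score))
--
-- def _xp_bonus_for_class(scores: dict[str, int], class_data: dict) -> int:
--     """
--     Calculate XP bonus percentage based on prime requisite(s).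
--
--     For classes with a single prime requisite the bonus is looked up
--     directly. For multiple prime requisites the lowest qualifying bonus
--     applies (per OSE rules).
--     """
--     prime_reqs = class_data.get("prime_requisite", [])
--     if not prime_reqs:
--         return 0
--
--     stat_map = {
--         "STR": scores.get("strength", 10),
--         "INT": scores.get("intelligence", 10),
--         "WIS": scores.get("wisdom", 10),
--         "DEX": scores.get("dexterity", 10),
--         "CON": scores.get("constitution", 10),
--         "CHA": scores.get("charisma", 10),
--     }
--
--     bonuses = [_XP_BONUS_PCT.get(_clamp(stat_map.get(pr, 10)), 0) for pr in prime_reqs]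
--     return min(bonuses)
-- ===== SOURCE B (Python) =====
-- _ATTR_NAME = {
--     "STR": "strength",
--     "INT": "intelligence",
--     "WIS": "wisdom",
--     "DEX": "dexterity",
--     "CON": "constitution",
--     "CHA": "charisma",
-- }
--
-- # (threshold, bonus): the first tier whose threshold exceeds the score applies.
-- _TIERS = ((6, -20), (9, -10), (13, 0), (16, 5))
--
-- def _xp_bonus_for_class(scores: dict[str, int], class_data: dict) -> int:
--     prime_reqs = class_data.get("prime_requisite", [])
--     if not prime_reqs:
--         return 0
--     # The bonus is monotone nondecreasing in the score, so the minimum bonus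
--     # across prime requisites equals the bonus of the minimum score.
--     lowest = min(scores.get(_ATTR_NAME[pr], 10) if pr in _ATTR_NAME else 10
--                  for pr in prime_reqs)
--     for threshold, bonus in _TIERS:
--         if lowest < threshold:
--             return bonus
--     return 10
-- ===== Notes on version B (the rewrite author's own statement) =====
-- stated objective: simpler
-- what changed: A maps every prime requisite through clamp + a 16-entry bonus table and takes min of the bonuses; B instead takes the minimum raw score across prime requisites first (valid because the bonus is monotone in the score) and then converts that single score with one scan over four threshold tiers, which also absorbs the clamping.
import Mathlib
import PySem

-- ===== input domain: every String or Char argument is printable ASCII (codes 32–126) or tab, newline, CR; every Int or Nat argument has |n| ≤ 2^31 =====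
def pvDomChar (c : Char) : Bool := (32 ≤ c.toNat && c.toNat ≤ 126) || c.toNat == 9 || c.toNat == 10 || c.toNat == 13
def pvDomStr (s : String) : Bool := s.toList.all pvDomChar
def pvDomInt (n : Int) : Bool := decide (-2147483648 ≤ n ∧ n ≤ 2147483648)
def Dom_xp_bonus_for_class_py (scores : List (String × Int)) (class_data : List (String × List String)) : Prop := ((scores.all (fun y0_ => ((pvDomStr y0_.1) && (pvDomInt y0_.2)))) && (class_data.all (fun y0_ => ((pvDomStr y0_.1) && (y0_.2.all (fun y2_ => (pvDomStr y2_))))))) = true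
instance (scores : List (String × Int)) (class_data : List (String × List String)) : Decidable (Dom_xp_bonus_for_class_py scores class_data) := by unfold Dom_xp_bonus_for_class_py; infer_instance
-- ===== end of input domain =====

-- ===== PORT A =====
-- B (objective: simpler): min of raw scores first, then one threshold-tier scan,
-- instead of A's per-requisite clamp + table lookup followed by min of bonuses.
def pvXPBonusPct : PySem.Dict Int Int := PySem.Dict.mk
  [(3,-20),(4,-20),(5,-20),(6,-10),(7,-10),(8,-10),(9,0),(10,0),(11,0),(12,0),
   (13,5),(14,5),(15,5),(16,10),(17,10),(18,10)]

def pvClamp (score : Int) : Int := max 3 (min 18 score)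

def pvStatMap (scores : List (String × Int)) : PySem.Dict String Int := PySem.Dict.mk
  [("STR", (PySem.Dict.mk scores).getD "strength" 10),
   ("INT", (PySem.Dict.mk scores).getD "intelligence" 10),
   ("WIS", (PySem.Dict.mk scores).getD "wisdom" 10),
   ("DEX", (PySem.Dict.mk scores).getD "dexterity" 10),
   ("CON", (PySem.Dict.mk scores).getD "constitution" 10),
   ("CHA", (PySem.Dict.mk scores).getD "charisma" 10)]

def xp_bonus_for_class_py (scores : List (String × Int)) (class_data : List (String × List String)) : Int :=
  let prime_reqs := (PySem.Dict.mk class_data).getD "prime_requisite" []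
  if prime_reqs = [] then 0
  else
    let bonuses := prime_reqs.map (fun pr => pvXPBonusPct.getD (pvClamp ((pvStatMap scores).getD pr 10)) 0)
    -- min(bonuses); the none branch is unreachable since prime_reqs ≠ []
    match PySem.List.min? bonuses (fun x => x) with
    | some m => m
    | none => 0

-- ===== PORT B =====
def pvAttrName : PySem.Dict String String := PySem.Dict.mk
  [("STR","strength"),("INT","intelligence"),("WIS","wisdom"),
   ("DEX","dexterity"),("CON","constitution"),("CHA","charisma")]

def pvTiers : List (Int × Int) := [(6,-20),(9,-10),(13,0),(16,5)]

-- 'for threshold, bonus in _TIERS: if lowest < threshold: return bonus; return 10'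
def pvTierBonus (lowest : Int) : Int :=
  match pvTiers.find? (fun tb => lowest < tb.1) with
  | some tb => tb.2
  | none => 10

def xp_bonus_for_class_py_alt (scores : List (String × Int)) (class_data : List (String × List String)) : Int :=
  let prime_reqs := (PySem.Dict.mk class_data).getD "prime_requisite" []
  if prime_reqs = [] then 0
  else
    let vals := prime_reqs.map (fun pr =>
      match pvAttrName.get? pr with
      | some name => (PySem.Dict.mk scores).getD name 10
      | none => (10 : Int))
    match PySem.List.min? vals (fun x => x) with
    | some lowest => pvTierBonus lowest
    | none => 0

-- ===== PRECONDITION & SPEC =====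
def Spec_xp_bonus_for_class_py (scores : List (String × Int)) (class_data : List (String × List String)) (out : Int) : Prop := out = xp_bonus_for_class_py_alt scores class_data
instance (scores : List (String × Int)) (class_data : List (String × List String)) (out : Int) : Decidable (Spec_xp_bonus_for_class_py scores class_data out) := by unfold Spec_xp_bonus_for_class_py; infer_instance

-- ===== CLAIM =====
def Claim_equal_xp_bonus_for_class_py : Prop := ∀ (scores : List (String × Int)) (class_data : List (String × List String)), Dom_xp_bonus_for_class_py scores class_data → Spec_xp_bonus_for_class_py scores class_data (xp_bonus_for_class_py scores class_data)

-- ===== LEMMAS AND PROOFS =====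
lemma pvTierBonus_eval (s : Int) :
    pvTierBonus s = if s < 6 then -20 else if s < 9 then -10
      else if s < 13 then 0 else if s < 16 then 5 else 10 := by
  by_cases h1 : s < 6 <;> by_cases h2 : s < 9 <;> by_cases h3 : s < 13 <;>
    by_cases h4 : s < 16 <;>
    simp [pvTierBonus, pvTiers, List.find?, h1, h2, h3, h4]

lemma pvTierBonus_mono {a b : Int} (h : a ≤ b) : pvTierBonus a ≤ pvTierBonus b := by
  rw [pvTierBonus_eval, pvTierBonus_eval]
  split_ifs <;> omega

lemma pvTierBonus_min (a b : Int) : pvTierBonus (min a b) = min (pvTierBonus a) (pvTierBonus b) := by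
  rcases le_total a b with h | h
  · rw [min_eq_left h, min_eq_left (pvTierBonus_mono h)]
  · rw [min_eq_right h, min_eq_right (pvTierBonus_mono h)]

lemma pvTable (c : Int) (h3 : 3 ≤ c) (h18 : c ≤ 18) : pvXPBonusPct.getD c 0 = pvTierBonus c := by
  interval_cases c <;> decide

lemma pvTierBonus_clamp (s : Int) : pvTierBonus (pvClamp s) = pvTierBonus s := by
  rw [pvTierBonus_eval, pvTierBonus_eval]
  unfold pvClamp
  split_ifs <;> omega

lemma pvLookup (s : Int) : pvXPBonusPct.getD (pvClamp s) 0 = pvTierBonus s := by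
  rw [pvTable (pvClamp s) (by unfold pvClamp; omega) (by unfold pvClamp; omega), pvTierBonus_clamp]

lemma pvStat (scores : List (String × Int)) (pr : String) :
    (pvStatMap scores).getD pr 10 =
      (match pvAttrName.get? pr with
        | some name => (PySem.Dict.mk scores).getD name 10
        | none => (10 : Int)) := by
  simp only [pvStatMap, pvAttrName, PySem.Dict.getD_eq_get?_getD, PySem.Dict.get?_mk_cons]
  split_ifs <;> rfl

lemma pvFoldTier (t : List Int) :
    ∀ a : Int, (t.map pvTierBonus).foldl min (pvTierBonus a) = pvTierBonus (t.foldl min a) := by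
  induction t with
  | nil => intro a; rfl
  | cons x s ih =>
    intro a
    simp only [List.map_cons, List.foldl_cons, ← pvTierBonus_min, ih]

-- ===== VERDICT =====
theorem xp_bonus_for_class_py_spec : Claim_equal_xp_bonus_for_class_py := by
  intro scores class_data _
  unfold Spec_xp_bonus_for_class_py xp_bonus_for_class_py xp_bonus_for_class_py_alt
  set l := (PySem.Dict.mk class_data).getD "prime_requisite" [] with hl
  cases l with
  | nil => simp
  | cons p rest =>
    simp only [reduceCtorEq, if_false, List.map_cons]
    set g : String → Int := fun pr =>
      (match pvAttrName.get? pr with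
        | some name => (PySem.Dict.mk scores).getD name 10
        | none => (10 : Int)) with hg
    have hfg : ∀ pr, pvXPBonusPct.getD (pvClamp ((pvStatMap scores).getD pr 10)) 0 = pvTierBonus (g pr) := by
      intro pr
      rw [pvStat scores pr, pvLookup]
    have hmap : rest.map (fun pr => pvXPBonusPct.getD (pvClamp ((pvStatMap scores).getD pr 10)) 0)
        = (rest.map g).map pvTierBonus := by
      rw [List.map_map]
      exact List.map_congr_left (fun x _ => hfg x)
    rw [hfg p, hmap, PySem.List.min?_id_cons, PySem.List.min?_id_cons, pvFoldTier]
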